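-- pv_equiv track=rewrite | github.com/rkorv/tglang2 | src/scripts/analyse.py | calc_per_label_accuracy
-- ===== SOURCE A (Python) =====
-- def calc_per_label_accuracy(pred, gt):
--     assert len(pred) == len(gt)
--     correct = {}
--     total = {}
--     for i in range(len(pred)):
--         if gt[i] not in correct:
--             correct[gt[i]] = 0
--             total[gt[i]] = 0
--         total[gt[i]] += 1
--         if pred[i] == gt[i]:
--             correct[gt[i]] += 1
--     return correct, total
-- ===== SOURCE B (Python) =====
-- from collections import Counter
--
-- def calc_per_label_accuracy(pred, gt):
--     assert len(pred) == len(gt)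
--     matches = [g for p, g in zip(pred, gt) if p == g]
--     correct_c = Counter(matches)
--     total_c = Counter(gt)
--     order = dict.fromkeys(gt)
--     correct = {g: correct_c[g] for g in order}
--     total = {g: total_c[g] for g in order}
--     return correct, total
-- ===== Notes on version B (the rewrite author's own statement) =====
-- stated objective: alternative
-- what changed: Replaces A's single indexed loop that incrementally updates both dicts (with an in-loop membership-initialisation) by a filter-then-count formulation: build the sublist of ground-truth labels at matching positions, take multiset counts of it and of gt via Counter, and assemble the two plain dicts by reindexing both counters over the first-appearance label order; zero-correct labels appear because reindexing uses total's key order and Counter lookup defaults to 0.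
import Mathlib
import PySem

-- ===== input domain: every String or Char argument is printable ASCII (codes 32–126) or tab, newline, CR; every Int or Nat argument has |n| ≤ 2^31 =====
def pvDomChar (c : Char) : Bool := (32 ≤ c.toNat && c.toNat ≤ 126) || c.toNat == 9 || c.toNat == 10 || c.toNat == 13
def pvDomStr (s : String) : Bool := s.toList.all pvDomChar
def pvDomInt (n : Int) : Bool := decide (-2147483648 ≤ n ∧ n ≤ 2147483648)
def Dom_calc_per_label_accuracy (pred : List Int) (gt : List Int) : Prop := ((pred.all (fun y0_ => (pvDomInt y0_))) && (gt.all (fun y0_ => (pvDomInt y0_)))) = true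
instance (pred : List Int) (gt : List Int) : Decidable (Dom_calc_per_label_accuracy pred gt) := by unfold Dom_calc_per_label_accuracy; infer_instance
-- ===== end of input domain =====

-- B replaces A's single indexed loop (incremental updates of both dicts with membership-init) by
-- filter-then-count: the sublist of labels at matching positions and gt are counted as multisets
-- (Counter), then both counters are reindexed over the first-appearance label order; same O(n).

-- ===== PORT A =====
-- A's loop body on state (correct, total) and the pair (pred[i], gt[i])
def stepA (s : PySem.Dict Int Int × PySem.Dict Int Int) (pg : Int × Int) :
    PySem.Dict Int Int × PySem.Dict Int Int :=
  -- if gt[i] not in correct: correct[gt[i]] = 0; total[gt[i]] = 0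
  let s1 := if s.1.contains pg.2 then s else (s.1.insert pg.2 0, s.2.insert pg.2 0)
  -- total[gt[i]] += 1
  let s2 := (s1.1, s1.2.insert pg.2 (s1.2.getD pg.2 0 + 1))
  -- if pred[i] == gt[i]: correct[gt[i]] += 1
  if pg.1 == pg.2 then (s2.1.insert pg.2 (s2.1.getD pg.2 0 + 1), s2.2) else s2

def calc_per_label_accuracy (pred : List Int) (gt : List Int) :
    (List (Int × Int)) × (List (Int × Int)) :=
  let st := (PySem.List.pyRange 0 (PySem.List.len pred) 1).foldl
    (fun s i => stepA s (PySem.List.pyGetD pred i 0, PySem.List.pyGetD gt i 0))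
    (PySem.Dict.empty, PySem.Dict.empty)
  (st.1.items, st.2.items)

-- ===== PORT B =====
def calc_per_label_accuracy_alt (pred : List Int) (gt : List Int) :
    (List (Int × Int)) × (List (Int × Int)) :=
  -- matches = [g for p, g in zip(pred, gt) if p == g]
  let matched := ((pred.zip gt).filter (fun pq => pq.1 == pq.2)).map Prod.snd
  -- correct_c = Counter(matches); total_c = Counter(gt)
  let correct_c := PySem.Dict.counter matched
  let total_c := PySem.Dict.counter gt
  -- order = dict.fromkeys(gt)  (its keys: first-appearance distinct labels)
  let order := PySem.List.dedup gt
  -- correct = {g: correct_c[g] for g in order}; total = {g: total_c[g] for g in order}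
  let correct := order.foldl (fun d g => d.insert g (correct_c.getD g 0)) PySem.Dict.empty
  let total := order.foldl (fun d g => d.insert g (total_c.getD g 0)) PySem.Dict.empty
  (correct.items, total.items)

-- ===== PRECONDITION & SPEC =====
-- A's `assert len(pred) == len(gt)` raises AssertionError otherwise; Pre_ is exactly that.
def Pre_calc_per_label_accuracy (pred : List Int) (gt : List Int) : Prop := pred.length = gt.length
instance (pred : List Int) (gt : List Int) : Decidable (Pre_calc_per_label_accuracy pred gt) := by unfold Pre_calc_per_label_accuracy; infer_instance

def pvWitness_calc_per_label_accuracy : List Int × List Int := ([1, 2, 3], [1, 2, 2])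

def Spec_calc_per_label_accuracy (pred : List Int) (gt : List Int) (out : (List (Int × Int)) × (List (Int × Int))) : Prop := out = calc_per_label_accuracy_alt pred gt
instance (pred : List Int) (gt : List Int) (out : (List (Int × Int)) × (List (Int × Int))) : Decidable (Spec_calc_per_label_accuracy pred gt out) := by unfold Spec_calc_per_label_accuracy; infer_instance

-- ===== CLAIM (what is proved, stated in full; the proofs are below) =====
def Claim_equal_calc_per_label_accuracy : Prop := ∀ (pred : List Int) (gt : List Int), Dom_calc_per_label_accuracy pred gt → Pre_calc_per_label_accuracy pred gt → Spec_calc_per_label_accuracy pred gt (calc_per_label_accuracy pred gt)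

-- ===== LEMMAS AND PROOFS =====

-- a dict whose items are a key list K tagged with values f k
def MD (K : List Int) (f : Int → Int) : PySem.Dict Int Int := PySem.Dict.mk (K.map fun k => (k, f k))

-- correct-count of label g among the pairs l
def cc (g : Int) (l : List (Int × Int)) : Int := (l.countP (fun pq => pq.2 == g && pq.1 == pq.2) : Int)

theorem get?_MD (K : List Int) (f : Int → Int) (g : Int) :
    (MD K f).get? g = if g ∈ K then some (f g) else none := by
  induction K with
  | nil => simp [MD, PySem.Dict.get?]
  | cons k K ih =>
    simp only [MD, List.map_cons, PySem.Dict.get?_mk_cons] at *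
    by_cases hk : k = g
    · subst hk; simp
    · simp [hk, ih, Ne.symm hk]

theorem keys_MD (K : List Int) (f : Int → Int) : (MD K f).keys = K := by
  simp [MD, PySem.Dict.keys, Function.comp_def]

theorem contains_MD (K : List Int) (f : Int → Int) (g : Int) :
    (MD K f).contains g = decide (g ∈ K) := by
  rw [PySem.Dict.contains_eq_decide_mem_keys, keys_MD]

theorem getD_MD (K : List Int) (f : Int → Int) (g : Int) (d0 : Int) :
    (MD K f).getD g d0 = if g ∈ K then f g else d0 := by
  rw [PySem.Dict.getD_eq_get?_getD, get?_MD]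
  by_cases hg : g ∈ K <;> simp [hg]

theorem insert_MD_mem (K : List Int) (f : Int → Int) {g : Int} (v : Int) (hg : g ∈ K) :
    (MD K f).insert g v = MD K (fun k => if k = g then v else f k) := by
  apply PySem.Dict.ext
  rw [PySem.Dict.items_insert_of_contains _ _ (by simp [contains_MD, hg])]
  simp only [MD, List.map_map]
  apply List.map_congr_left
  intro k _
  by_cases hk : k = g
  · subst hk; simp
  · simp [hk]

theorem insert_MD_fresh (K : List Int) (f : Int → Int) {g : Int} (v : Int) (hg : g ∉ K) :
    (MD K f).insert g v = MD (K ++ [g]) (fun k => if k = g then v else f k) := by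
  apply PySem.Dict.ext
  rw [PySem.Dict.items_insert_of_not_contains _ _ (by simp [contains_MD, hg])]
  simp only [MD, List.map_append, List.map_cons, List.map_nil]
  congr 1
  apply List.map_congr_left
  intro k hk
  have : k ≠ g := fun h => hg (h ▸ hk)
  simp [this]

theorem MD_congr (K : List Int) (f f' : Int → Int) (h : ∀ k ∈ K, f k = f' k) :
    MD K f = MD K f' := by
  apply PySem.Dict.ext
  simp only [MD]
  apply List.map_congr_left
  intro k hk
  simp [h k hk]

theorem cc_append (g : Int) (l : List (Int × Int)) (x : Int × Int) :
    cc g (l ++ [x]) = cc g l + (if x.2 = g ∧ x.1 = x.2 then 1 else 0) := by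
  simp only [cc, List.countP_append, List.countP_cons, List.countP_nil]
  by_cases h1 : x.2 = g <;> by_cases h2 : x.1 = x.2 <;> simp [h1, h2]

theorem count_append_singleton (g x : Int) (xs : List Int) :
    (((xs ++ [x]).count g : Nat) : Int) = ((xs.count g : Nat) : Int) + (if x = g then 1 else 0) := by
  rw [List.count_append, List.count_singleton]
  by_cases h : x = g <;> simp [h]

theorem cc_zero_of_not_mem (k : Int) (l : List (Int × Int)) (h : k ∉ l.map Prod.snd) :
    cc k l = 0 := by
  have h0 : l.countP (fun pq => pq.2 == k && pq.1 == pq.2) = 0 := by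
    rw [List.countP_eq_zero]
    intro pq hpql hb
    rcases Bool.and_eq_true_iff.1 hb with ⟨h1, _⟩
    exact h ((eq_of_beq h1) ▸ List.mem_map_of_mem hpql)
  simp [cc, h0]

-- one step of A's loop on the characterised state
theorem stepA_char (l : List (Int × Int)) (x : Int × Int) :
    stepA (MD (PySem.List.dedup (l.map Prod.snd)) (fun g => cc g l),
           MD (PySem.List.dedup (l.map Prod.snd)) (fun g => ((l.map Prod.snd).count g : Int))) x
      = (MD (PySem.List.dedup ((l ++ [x]).map Prod.snd)) (fun g => cc g (l ++ [x])),
         MD (PySem.List.dedup ((l ++ [x]).map Prod.snd))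
            (fun g => (((l ++ [x]).map Prod.snd).count g : Int))) := by
  have hK : PySem.List.dedup ((l ++ [x]).map Prod.snd)
      = if x.2 ∈ PySem.List.dedup (l.map Prod.snd)
        then PySem.List.dedup (l.map Prod.snd)
        else PySem.List.dedup (l.map Prod.snd) ++ [x.2] := by
    simp only [List.map_append, List.map_cons, List.map_nil, PySem.List.dedup_eq_ofList,
      PySem.Set.ofList_append_singleton, PySem.Set.add_eq_ite]
  set K := PySem.List.dedup (l.map Prod.snd) with hKdef
  set fc := fun g => cc g l with hfc
  set ft := fun g => (((l.map Prod.snd).count g : Nat) : Int) with hft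
  have hctx : ∀ (k : Int), (((l ++ [x]).map Prod.snd).count k : Int)
      = ft k + (if x.2 = k then 1 else 0) := by
    intro k
    simp only [List.map_append, List.map_cons, List.map_nil, hft]
    exact count_append_singleton k x.2 (l.map Prod.snd)
  by_cases hm : x.2 ∈ K
  · rw [hK]; simp only [hm, if_true]
    simp only [stepA, contains_MD, hm, decide_true, if_true]
    have h1 : (MD K ft).insert x.2 ((MD K ft).getD x.2 0 + 1)
        = MD K (fun k => if k = x.2 then ft x.2 + 1 else ft k) := by
      rw [getD_MD, if_pos hm, insert_MD_mem _ _ _ hm]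
    rw [h1]
    by_cases hpq : x.1 = x.2
    · simp only [hpq, BEq.rfl, if_true]
      have h2 : (MD K fc).insert x.2 ((MD K fc).getD x.2 0 + 1)
          = MD K (fun k => if k = x.2 then fc x.2 + 1 else fc k) := by
        rw [getD_MD, if_pos hm, insert_MD_mem _ _ _ hm]
      rw [h2]
      refine Prod.ext ?_ ?_ <;> simp only
      · apply MD_congr; intro k hk
        rw [cc_append]
        by_cases hkg : k = x.2
        · subst hkg; simp [hfc, hpq]
        · have hkg' : ¬x.2 = k := fun h => hkg h.symm
          simp [hfc, hkg, hkg']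
      · apply MD_congr; intro k hk
        rw [hctx k]
        by_cases hkg : k = x.2
        · subst hkg; simp
        · have hkg' : ¬x.2 = k := fun h => hkg h.symm
          simp [hkg, hkg']
    · have hb : (x.1 == x.2) = false := by simp [hpq]
      simp only [hb, Bool.false_eq_true, if_false]
      refine Prod.ext ?_ ?_ <;> simp only
      · apply MD_congr; intro k hk
        rw [cc_append]
        simp [hfc, hpq]
      · apply MD_congr; intro k hk
        rw [hctx k]
        by_cases hkg : k = x.2
        · subst hkg; simp
        · have hkg' : ¬x.2 = k := fun h => hkg h.symm
          simp [hkg, hkg']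
  · rw [hK]; simp only [hm, if_false]
    simp only [stepA, contains_MD, hm, decide_false, Bool.false_eq_true, if_false]
    have hmem : x.2 ∈ K ++ [x.2] := by simp
    have hcount : x.2 ∉ l.map Prod.snd := fun h => hm ((PySem.List.mem_dedup _ _).2 h)
    have hcc0 : cc x.2 l = 0 := cc_zero_of_not_mem _ _ hcount
    have hct0 : ft x.2 = 0 := by
      simp [hft, List.count_eq_zero.2 hcount]
    have h1 : (MD K fc).insert x.2 0 = MD (K ++ [x.2]) (fun k => if k = x.2 then 0 else fc k) :=
      insert_MD_fresh _ _ _ hm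
    have h2 : (MD K ft).insert x.2 0 = MD (K ++ [x.2]) (fun k => if k = x.2 then 0 else ft k) :=
      insert_MD_fresh _ _ _ hm
    rw [h1, h2]
    have h3 : (MD (K ++ [x.2]) (fun k => if k = x.2 then 0 else ft k)).insert x.2
          ((MD (K ++ [x.2]) (fun k => if k = x.2 then 0 else ft k)).getD x.2 0 + 1)
        = MD (K ++ [x.2]) (fun k => if k = x.2 then 1 else ft k) := by
      rw [getD_MD, if_pos hmem, insert_MD_mem _ _ _ hmem]
      apply MD_congr; intro k hk
      by_cases hkg : k = x.2 <;> simp [hkg]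
    rw [h3]
    by_cases hpq : x.1 = x.2
    · simp only [hpq, BEq.rfl, if_true]
      have h4 : (MD (K ++ [x.2]) (fun k => if k = x.2 then 0 else fc k)).insert x.2
            ((MD (K ++ [x.2]) (fun k => if k = x.2 then 0 else fc k)).getD x.2 0 + 1)
          = MD (K ++ [x.2]) (fun k => if k = x.2 then 1 else fc k) := by
        rw [getD_MD, if_pos hmem, insert_MD_mem _ _ _ hmem]
        apply MD_congr; intro k hk
        by_cases hkg : k = x.2 <;> simp [hkg]
      rw [h4]
      refine Prod.ext ?_ ?_ <;> simp only
      · apply MD_congr; intro k hk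
        rw [cc_append]
        by_cases hkg : k = x.2
        · subst hkg; simp [hcc0, hpq]
        · have hkg' : ¬x.2 = k := fun h => hkg h.symm
          simp [hfc, hkg, hkg']
      · apply MD_congr; intro k hk
        rw [hctx k]
        by_cases hkg : k = x.2
        · subst hkg; simp [hct0]
        · have hkg' : ¬x.2 = k := fun h => hkg h.symm
          simp [hkg, hkg']
    · have hb : (x.1 == x.2) = false := by simp [hpq]
      simp only [hb, Bool.false_eq_true, if_false]
      refine Prod.ext ?_ ?_ <;> simp only
      · apply MD_congr; intro k hk
        rw [cc_append]
        by_cases hkg : k = x.2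
        · subst hkg; simp [hcc0, hpq]
        · simp [hfc, hkg, hpq]
      · apply MD_congr; intro k hk
        rw [hctx k]
        by_cases hkg : k = x.2
        · subst hkg; simp [hct0]
        · have hkg' : ¬x.2 = k := fun h => hkg h.symm
          simp [hkg, hkg']

-- characterisation of A's loop over the list of (pred[i], gt[i]) pairs
theorem A_char (l : List (Int × Int)) :
    l.foldl stepA (PySem.Dict.empty, PySem.Dict.empty)
      = (MD (PySem.List.dedup (l.map Prod.snd)) (fun g => cc g l),
         MD (PySem.List.dedup (l.map Prod.snd)) (fun g => ((l.map Prod.snd).count g : Int))) := by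
  induction l using List.reverseRecOn with
  | nil => rfl
  | append_singleton l x ih =>
    rw [List.foldl_append, List.foldl_cons, List.foldl_nil, ih, stepA_char]

-- B's dict comprehension over the nodup label list builds exactly MD labels f
theorem comp_MD (K : List Int) (f : Int → Int) (hK : K.Nodup) :
    K.foldl (fun d g => d.insert g (f g)) PySem.Dict.empty = MD K f := by
  have h := PySem.Dict.items_foldl_insert_fresh K id f PySem.Dict.empty
        (fun a _ => by simp) (by simpa using hK)
  simp only [id_eq] at h
  apply PySem.Dict.ext
  rw [h]
  simp [MD, PySem.Dict.empty]

-- counting a label in the matched-label sublist is the cc-count over the pairs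
theorem count_matches (g : Int) (l : List (Int × Int)) :
    (((l.filter (fun pq => pq.1 == pq.2)).map Prod.snd).count g : Int) = cc g l := by
  simp only [cc, List.count, List.countP_map, List.countP_filter, Function.comp_def]

-- ===== VERDICT (by name: the statement is the Claim_ definition above) =====
theorem calc_per_label_accuracy_spec : Claim_equal_calc_per_label_accuracy := by
  intro pred gt _ hpre
  unfold Spec_calc_per_label_accuracy
  unfold calc_per_label_accuracy calc_per_label_accuracy_alt
  have hlen : pred.length = gt.length := hpre
  -- A's index loop is the pair loop over pred.zip gt
  have hmap : (PySem.List.pyRange 0 (PySem.List.len pred) 1).map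
      (fun i => (PySem.List.pyGetD pred i 0, PySem.List.pyGetD gt i 0)) = pred.zip gt := by
    rw [← List.zip_map']
    congr 1
    · exact PySem.List.map_pyGetD_pyRange_zero pred 0
    · have h2 : PySem.List.len pred = PySem.List.len gt := by
        simp [PySem.List.len, hlen]
      rw [h2]
      exact PySem.List.map_pyGetD_pyRange_zero gt 0
  have hfoldA : (PySem.List.pyRange 0 (PySem.List.len pred) 1).foldl
      (fun s i => stepA s (PySem.List.pyGetD pred i 0, PySem.List.pyGetD gt i 0))
      (PySem.Dict.empty, PySem.Dict.empty)
      = (pred.zip gt).foldl stepA (PySem.Dict.empty, PySem.Dict.empty) := by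
    rw [← hmap, List.foldl_map]
  have hsnd : (pred.zip gt).map Prod.snd = gt := List.map_snd_zip (le_of_eq hlen.symm)
  simp only [hfoldA, A_char, hsnd]
  rw [comp_MD _ _ (PySem.List.nodup_dedup gt), comp_MD _ _ (PySem.List.nodup_dedup gt)]
  refine Prod.ext ?_ ?_ <;> simp only
  · rw [MD_congr _ (fun g => cc g (pred.zip gt))
      (fun g => (PySem.Dict.counter
        (((pred.zip gt).filter (fun pq => pq.1 == pq.2)).map Prod.snd)).getD g 0)
      (fun k _ => by simp only [PySem.Dict.getD_counter]; exact (count_matches k _).symm)]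
  · rw [MD_congr _ (fun g => ((gt.count g : Nat) : Int))
      (fun g => (PySem.Dict.counter gt).getD g 0)
      (fun k _ => by simp only [PySem.Dict.getD_counter])]
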